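-- pv_equiv track=rewrite | github.com/Va1namo1nen/homework_for_students | 3_functions/1_phone_text_code/decode/decode.py | decode_numbers
-- ===== SOURCE A (Python) =====
-- def decode_numbers(codes: str) -> str | None:
--     code_to_char_map = build_code_to_char_map()
--
--     decoded_chars = []
--     try:
--         for code in codes.split():
--             decoded_chars.append(code_to_char_map[code])
--         return ''.join(decoded_chars)
--     except KeyError:
--         return None
--
-- def build_code_to_char_map() -> dict[str, str]:
--     number_codes = create_codes()
--     characters = create_characters()
--     return {code: char for code, char in zip(number_codes, characters)}
--
-- def create_codes() -> list[str]:
--     codes = ["0"]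
--     for num in range(1, 10):
--         if num == 1:
--             for length in range(1, 7):
--                 codes.append(str(num) * length)
--         else:
--             for length in range(1, 5):
--                 codes.append(str(num) * length)
--     return codes
--
-- def create_characters() -> list[str]:
--     punctuation = [" ", ".", ",", "?", "!", ":", ";"]
--     russian_letters = [chr(i) for i in range(1072, 1104)]  # Символы русского алфавита
--     return punctuation + russian_letters
-- ===== SOURCE B (Python) =====
-- CHARS = " .,?!:;" + "".join(chr(i) for i in range(1072, 1104))
--
-- def _decode_token(tok):
--     d = tok[0]
--     if not ('0' <= d <= '9') or tok != d * len(tok):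
--         return None
--     length = len(tok)
--     if d == '0':
--         return CHARS[0] if length == 1 else None
--     if d == '1':
--         return CHARS[length] if length <= 6 else None
--     return CHARS[7 + (ord(d) - ord('2')) * 4 + (length - 1)] if length <= 4 else None
--
-- def decode_numbers(codes: str) -> str | None:
--     decoded = []
--     for tok in codes.split():
--         c = _decode_token(tok)
--         if c is None:
--             return None
--         decoded.append(c)
--     return ''.join(decoded)
-- ===== Notes on version B (the rewrite author's own statement) =====
-- stated objective: alternative
-- what changed: B drops A's precomputed 39-entry code-to-char dictionary and decodes each token arithmetically: it checks the token is a run of one digit and maps (digit, run length) to an index into a fixed 39-character table.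
import Mathlib
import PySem

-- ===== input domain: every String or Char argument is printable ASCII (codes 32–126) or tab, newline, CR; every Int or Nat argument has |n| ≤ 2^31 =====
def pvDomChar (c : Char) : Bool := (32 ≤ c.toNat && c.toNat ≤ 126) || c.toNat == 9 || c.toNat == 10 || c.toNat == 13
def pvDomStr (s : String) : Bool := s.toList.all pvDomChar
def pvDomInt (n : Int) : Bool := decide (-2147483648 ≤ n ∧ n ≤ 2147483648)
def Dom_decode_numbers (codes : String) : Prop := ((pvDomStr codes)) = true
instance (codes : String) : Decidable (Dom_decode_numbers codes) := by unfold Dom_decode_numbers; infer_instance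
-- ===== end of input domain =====

-- B decodes each token arithmetically (run-of-one-digit check + index formula) instead of
-- building and consulting a 39-entry code→char dictionary; objective: alternative decomposition.

-- ===== PORT A =====
-- Python `s * n` on a string (hand port, exact: concatenation of n copies via PySem.List.pyRepeat on the char list)
def pvStrMul (s : String) (n : Int) : String :=
  String.ofList (PySem.List.pyRepeat s.toList n)

def create_codes : List String :=
  (PySem.List.pyRange 1 10 1).foldl
    (fun codes num =>
      if num == 1 then
        (PySem.List.pyRange 1 7 1).foldl
          (fun cs length => cs ++ [pvStrMul (PySem.Int.toStr num) length]) codes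
      else
        (PySem.List.pyRange 1 5 1).foldl
          (fun cs length => cs ++ [pvStrMul (PySem.Int.toStr num) length]) codes)
    ["0"]

-- chr(i) for the Russian letters (hand port, exact on these code points: Char.ofNat = chr)
def create_characters : List String :=
  [" ", ".", ",", "?", "!", ":", ";"] ++
    (PySem.List.pyRange 1072 1104 1).map (fun i => String.ofList [Char.ofNat i.toNat])

def build_code_to_char_map : PySem.Dict String String :=
  ((create_codes).zip (create_characters)).foldl
    (fun d p => d.insert p.1 p.2) PySem.Dict.empty

-- the `for code in codes.split(): decoded_chars.append(map[code])` loop; `none` = the caught KeyError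
def pvDecodeLoopA (m : PySem.Dict String String) :
    List String → List String → Option (List String)
  | [], acc => some acc
  | c :: cs, acc =>
    match m.get? c with
    | none => none
    | some ch => pvDecodeLoopA m cs (acc ++ [ch])

def decode_numbers (codes : String) : Option String :=
  let m := build_code_to_char_map
  match pvDecodeLoopA m (PySem.Str.split₀ codes) [] with
  | none => none
  | some chars => some (PySem.Str.join "" chars)

-- ===== PORT B =====
def pvCHARS : String := " .,?!:;абвгдежзийклмнопрстуфхцчшщъыьэюя"

def pvDecodeTok (tok : String) : Option Char :=
  match tok.toList with
  | [] => none  -- unreachable: split() yields non-empty tokens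
  | d :: rest =>
    if ('0' ≤ d ∧ d ≤ '9') ∧ rest.all (· == d) = true then
      let length := rest.length + 1
      if d == '0' then (if length == 1 then PySem.Str.pyGet? pvCHARS 0 else none)
      else if d == '1' then
        (if length ≤ 6 then PySem.Str.pyGet? pvCHARS (length : Int) else none)
      else
        (if length ≤ 4 then
          PySem.Str.pyGet? pvCHARS (7 + ((d.toNat : Int) - 50) * 4 + ((length : Int) - 1))
        else none)
    else none

def pvLoopB : List String → List Char → Option String
  | [], acc => some (String.ofList acc)  -- ''.join(decoded)
  | t :: ts, acc =>
    match pvDecodeTok t with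
    | none => none
    | some c => pvLoopB ts (acc ++ [c])

def decode_numbers_alt (codes : String) : Option String :=
  pvLoopB (PySem.Str.split₀ codes) []

-- ===== PRECONDITION & SPEC =====
def Spec_decode_numbers (codes : String) (out : Option String) : Prop := out = decode_numbers_alt codes
instance (codes : String) (out : Option String) : Decidable (Spec_decode_numbers codes out) := by unfold Spec_decode_numbers; infer_instance

-- ===== CLAIM (what is proved, stated in full; the proofs are below) =====
def Claim_equal_decode_numbers : Prop := ∀ (codes : String), Dom_decode_numbers codes → Spec_decode_numbers codes (decode_numbers codes)

-- ===== LEMMAS AND PROOFS =====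

-- the 39 valid codes, and A's map as a literal
def pvKeys : List String :=
  ["0", "1", "11", "111", "1111", "11111", "111111",
   "2", "22", "222", "2222", "3", "33", "333", "3333",
   "4", "44", "444", "4444", "5", "55", "555", "5555",
   "6", "66", "666", "6666", "7", "77", "777", "7777",
   "8", "88", "888", "8888", "9", "99", "999", "9999"]

def pvMapLit : PySem.Dict String String :=
  PySem.Dict.mk
    [("0", " "), ("1", "."), ("11", ","), ("111", "?"), ("1111", "!"), ("11111", ":"),
     ("111111", ";"), ("2", "а"), ("22", "б"), ("222", "в"), ("2222", "г"), ("3", "д"),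
     ("33", "е"), ("333", "ж"), ("3333", "з"), ("4", "и"), ("44", "й"), ("444", "к"),
     ("4444", "л"), ("5", "м"), ("55", "н"), ("555", "о"), ("5555", "п"), ("6", "р"),
     ("66", "с"), ("666", "т"), ("6666", "у"), ("7", "ф"), ("77", "х"), ("777", "ц"),
     ("7777", "ч"), ("8", "ш"), ("88", "щ"), ("888", "ъ"), ("8888", "ы"), ("9", "ь"),
     ("99", "э"), ("999", "ю"), ("9999", "я")]

set_option maxRecDepth 8192 in
lemma pvMap_eq : build_code_to_char_map = pvMapLit := by decide

lemma pvMapLit_keys : pvMapLit.keys = pvKeys := by decide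

lemma pv_mem1 (L : Nat) (h1 : 1 ≤ L) (h2 : L ≤ 6) :
    String.ofList (List.replicate L '1') ∈ pvKeys := by
  interval_cases L <;> decide

lemma pv_mem2 (n L : Nat) (hn1 : 50 ≤ n) (hn2 : n ≤ 57) (h1 : 1 ≤ L) (h2 : L ≤ 4) :
    String.ofList (List.replicate L (Char.ofNat n)) ∈ pvKeys := by
  interval_cases n <;> interval_cases L <;> decide

-- a token B decodes successfully is one of the 39 codes
lemma pv_tok_mem (t : String) (h : pvDecodeTok t ≠ none) : t ∈ pvKeys := by
  unfold pvDecodeTok at h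
  cases htl : t.toList with
  | nil => rw [htl] at h; simp at h
  | cons d rest =>
    rw [htl] at h
    dsimp only at h
    have ht : t = String.ofList (d :: rest) := by
      rw [← htl, String.ofList_toList]
    by_cases hc : ('0' ≤ d ∧ d ≤ '9') ∧ rest.all (· == d) = true
    · obtain ⟨hd, hall⟩ := hc
      have hrep : rest = List.replicate rest.length d := by
        rw [List.eq_replicate_length]; simpa using hall
      have hdn : 48 ≤ d.toNat ∧ d.toNat ≤ 57 := by
        simpa [Char.le_def, UInt32.le_iff_toNat_le] using hd
      have hdof : d = Char.ofNat d.toNat := (Char.ofNat_toNat d).symm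
      have htrep : t = String.ofList (List.replicate (rest.length + 1) d) := by
        rw [ht]; congr 1; rw [List.replicate_succ, ← hrep]
      rw [if_pos ⟨hd, hall⟩] at h
      by_cases h0 : d = '0'
      · subst h0
        by_cases hl : rest.length + 1 = 1
        · have : rest.length = 0 := by omega
          rw [htrep, this]; decide
        · exfalso; apply h; simp only [beq_self_eq_true, if_true]
          rw [if_neg (by simpa using hl)]
      · by_cases h1 : d = '1'
        · subst h1
          rw [if_neg (by decide), if_pos (by decide)] at h
          by_cases hl : rest.length + 1 ≤ 6
          · rw [htrep]; exact pv_mem1 _ (by omega) hl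
          · exfalso; exact h (by rw [if_neg hl])
        · have hne0 : (d == '0') = false := by simpa using h0
          have hne1 : (d == '1') = false := by simpa using h1
          rw [hne0, if_neg (by simp), hne1, if_neg (by simp)] at h
          have hdn2 : 50 ≤ d.toNat := by
            by_contra hlt
            push Not at hlt
            have h48 := hdn.1
            have : d.toNat = 48 ∨ d.toNat = 49 := by omega
            rcases this with hh | hh
            · exact h0 (by rw [hdof, hh]; try decide)
            · exact h1 (by rw [hdof, hh]; try decide)
          by_cases hl : rest.length + 1 ≤ 4
          · rw [htrep, hdof]
            exact pv_mem2 _ _ hdn2 hdn.2 (by omega) hl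
          · exfalso; exact h (by rw [if_neg hl])
    · exact absurd (by rw [if_neg hc] at h; exact h rfl) not_false

-- per-token agreement: A's map lookup = B's arithmetic decode (as a single-char string)
lemma pv_tok_eq (t : String) :
    build_code_to_char_map.get? t = (pvDecodeTok t).map (fun c => String.ofList [c]) := by
  rw [pvMap_eq]
  by_cases h : t ∈ pvKeys
  · fin_cases h <;> decide
  · have hB : pvDecodeTok t = none := by
      by_contra hne; exact h (pv_tok_mem t hne)
    rw [hB, Option.map_none, PySem.Dict.get?_eq_none_iff_not_mem_keys, pvMapLit_keys]
    exact h

-- the two loops agree when the accumulators correspond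
lemma pv_loop_eq (ts : List String) (accB : List Char) :
    (match pvDecodeLoopA build_code_to_char_map ts (accB.map (fun c => String.ofList [c])) with
     | none => none
     | some chars => some (PySem.Str.join "" chars)) = pvLoopB ts accB := by
  induction ts generalizing accB with
  | nil =>
    simp only [pvDecodeLoopA, pvLoopB]
    congr 1
    apply String.toList_inj.mp
    rw [PySem.Str.toList_join]
    simp only [List.map_map, Function.comp_def, String.toList_ofList, String.toList_empty]
    exact PySem.Chars.join_nil_singletons accB
  | cons t ts ih =>
    simp only [pvDecodeLoopA, pvLoopB, pv_tok_eq t]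
    cases pvDecodeTok t with
    | none => rfl
    | some c =>
      simpa using ih (accB ++ [c])

-- ===== VERDICT (by name: the statement is the Claim_ definition above) =====
theorem decode_numbers_spec : Claim_equal_decode_numbers := by
  intro codes _
  unfold Spec_decode_numbers decode_numbers decode_numbers_alt
  simpa using pv_loop_eq (PySem.Str.split₀ codes) []
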